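-- pv_equiv track=rewrite | github.com/davidros11/custom-HTTP-server | mhttp/messages.py | _capitalize_header
-- ===== SOURCE A (Python) =====
-- def _capitalize_header(header: str):
--     char_list = list(header)
--     char_list[0] = char_list[0].upper()
--     start = 0
--     while True:
--         try:
--             start = char_list.index('-', start) + 1
--             char_list[start] = char_list[start].upper()
--         except (ValueError, IndexError):
--             return ''.join(char_list)
-- ===== SOURCE B (Python) =====
-- def _capitalize_header(header: str):
--     chars = []
--     cap = True
--     for c in header:
--         if c == '-':
--             chars.append('-')
--             cap = True
--         elif cap:
--             chars.append(c.upper())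
--             cap = False
--         else:
--             chars.append(c)
--     return ''.join(chars)
-- ===== Notes on version B (the rewrite author's own statement) =====
-- stated objective: simpler
-- what changed: Replaced A's exception-driven loop of repeated list.index('-', start) scans with in-place mutation by a single left-to-right pass carrying a 'capitalize next character' flag.
import Mathlib
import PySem

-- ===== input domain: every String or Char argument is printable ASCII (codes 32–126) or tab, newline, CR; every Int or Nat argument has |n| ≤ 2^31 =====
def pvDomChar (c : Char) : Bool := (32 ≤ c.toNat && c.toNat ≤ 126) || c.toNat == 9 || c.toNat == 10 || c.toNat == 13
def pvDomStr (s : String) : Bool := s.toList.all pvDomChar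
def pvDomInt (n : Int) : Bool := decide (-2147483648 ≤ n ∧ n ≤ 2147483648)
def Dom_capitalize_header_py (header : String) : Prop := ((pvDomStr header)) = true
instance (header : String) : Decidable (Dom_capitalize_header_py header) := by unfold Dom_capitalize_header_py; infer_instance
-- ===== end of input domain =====

-- B replaces A's exception-driven repeated .index('-') scans with one pass carrying a
-- "capitalize next" flag (objective: simpler); equal return value on every non-empty ASCII string.

-- ===== PORT A =====
-- the while-True loop: char_list.index('-', start) is ported as index? on the dropped
-- suffix (first occurrence at position ≥ start); ValueError (none) and IndexError
-- (start past the end) both return the joined list, as in A's except clause.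
def pvALoop (l : List Char) (start : Nat) : List Char :=
  match PySem.List.index? (l.drop start) '-' with
  | none => l
  | some k =>
      let s := start + k + 1
      if h : s < l.length then
        pvALoop (l.set s (PySem.Chars.upperChar l[s])) s
      else l
termination_by l.length - start
decreasing_by simp only [List.length_set]; omega

def capitalize_header_py (header : String) : String :=
  match header.toList with
  | [] => ""  -- unreachable under Pre_: char_list[0] raises IndexError in Python
  | c :: rest => String.mk (pvALoop (PySem.Chars.upperChar c :: rest) 0)

-- ===== PORT B =====
-- the for-loop over the characters with the accumulator list and the `cap` flag
def pvBLoop : List Char → Bool → List Char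
  | [], _ => []
  | c :: rest, cap =>
      if c = '-' then '-' :: pvBLoop rest true
      else if cap then PySem.Chars.upperChar c :: pvBLoop rest false
      else c :: pvBLoop rest false

def capitalize_header_py_alt (header : String) : String :=
  String.mk (pvBLoop header.toList true)

-- ===== PRECONDITION & SPEC =====
-- Pre_ excludes only the empty string, on which A raises IndexError.
def Pre_capitalize_header_py (header : String) : Prop := header ≠ ""
instance (header : String) : Decidable (Pre_capitalize_header_py header) := by
  unfold Pre_capitalize_header_py; infer_instance

def pvWitness_capitalize_header_py : String := "content-type"

def Spec_capitalize_header_py (header : String) (out : String) : Prop :=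
  out = capitalize_header_py_alt header
instance (header : String) (out : String) : Decidable (Spec_capitalize_header_py header out) := by
  unfold Spec_capitalize_header_py; infer_instance

-- ===== CLAIM (what is proved, stated in full; the proofs are below) =====
def Claim_equal_capitalize_header_py : Prop :=
  ∀ (header : String), Dom_capitalize_header_py header → Pre_capitalize_header_py header →
    Spec_capitalize_header_py header (capitalize_header_py header)

-- ===== LEMMAS AND PROOFS =====

theorem pv_upperChar_dash : PySem.Chars.upperChar '-' = '-' := by decide

theorem pv_upperChar_ne_dash (c : Char) (h : c ≠ '-') : PySem.Chars.upperChar c ≠ '-' := by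
  unfold PySem.Chars.upperChar
  split
  · rename_i hl
    simp only [PySem.Chars.islower, Bool.and_eq_true, decide_eq_true_eq] at hl
    have h1 : 97 ≤ c.toNat := hl.1
    have h2 : c.toNat ≤ 122 := hl.2
    intro heq
    have hv : (c.toNat - 32).isValidChar := by left; omega
    have hthis := congrArg Char.toNat heq
    rw [Char.toNat_ofNat, if_pos hv] at hthis
    have hd : ('-' : Char).toNat = 45 := rfl
    rw [hd] at hthis; omega
  · exact h

-- bGo on a dash-free list with flag false is the identity
theorem pvBLoop_no_dash (l : List Char) (h : '-' ∉ l) : pvBLoop l false = l := by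
  induction l with
  | nil => rfl
  | cons x xs ih =>
      simp only [List.mem_cons, not_or] at h
      simp [pvBLoop, Ne.symm h.1, ih h.2]

theorem pvBLoop_append (pre t : List Char) (h : '-' ∉ pre) :
    pvBLoop (pre ++ t) false = pre ++ pvBLoop t false := by
  induction pre with
  | nil => rfl
  | cons x xs ih =>
      simp only [List.mem_cons, not_or] at h
      simp [pvBLoop, Ne.symm h.1, ih h.2]

theorem pvBLoop_true_cons (c : Char) (rest : List Char) :
    pvBLoop (c :: rest) true = pvBLoop (PySem.Chars.upperChar c :: rest) false := by
  by_cases hc : c = '-'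
  · subst hc; simp [pvBLoop, pv_upperChar_dash]
  · simp [pvBLoop, hc, pv_upperChar_ne_dash c hc]

-- main invariant of A's loop
theorem pvALoop_eq (n : Nat) : ∀ (l : List Char) (start : Nat), l.length - start = n →
    pvALoop l start = l.take start ++ pvBLoop (l.drop start) false := by
  induction n using Nat.strong_induction_on with
  | _ n ih =>
    intro l start hn
    rw [pvALoop]
    cases hidx : PySem.List.index? (l.drop start) '-' with
    | none =>
      rw [PySem.List.index?_eq_none_iff] at hidx
      rw [pvBLoop_no_dash _ hidx, List.take_append_drop]
    | some k =>
      rw [PySem.List.index?_eq_some_iff] at hidx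
      obtain ⟨pre, suf, hsplit, hlen, hnot⟩ := hidx
      have hdroplen : l.length - start = (pre ++ '-' :: suf).length := by
        rw [← hsplit, List.length_drop]
      have hstartlt : start < l.length := by
        simp at hdroplen; omega
      cases suf with
      | nil =>
        have hs : ¬ (start + k + 1 < l.length) := by
          simp at hdroplen; omega
        simp only [dif_neg hs]
        conv_rhs => rw [hsplit, pvBLoop_append _ _ hnot]
        conv_lhs => rw [← List.take_append_drop start l, hsplit]
        simp [pvBLoop]
      | cons c rest =>
        have hs : start + k + 1 < l.length := by
          simp at hdroplen; omega
        simp only [dif_pos hs]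
        have hget : l[start + k + 1]'hs = c := by
          have h1 : (l.drop start)[k+1]? = l[start + (k+1)]? := List.getElem?_drop
          rw [hsplit, List.getElem?_append_right (by omega)] at h1
          simp [hlen] at h1
          have h2 : l[start + k + 1]? = some (l[start + k + 1]'hs) := List.getElem?_eq_getElem hs
          rw [show start + (k+1) = start + k + 1 by omega] at h1
          rw [h2] at h1
          simp only [Option.some.injEq] at h1
          first | exact h1 | exact h1.symm
        rw [hget]
        have hset : l.set (start + k + 1) (PySem.Chars.upperChar c)
            = l.take start ++ pre ++ '-' :: PySem.Chars.upperChar c :: rest := by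
          conv_lhs => rw [← List.take_append_drop start l, hsplit]
          have hts : (l.take start).length = start := by
            rw [List.length_take]; omega
          rw [List.set_append_right _ _ (by omega)]
          rw [hts, List.append_assoc]
          congr 1
          rw [show start + k + 1 - start = k + 1 by omega]
          rw [List.set_append_right _ _ (by omega), hlen]
          simp
        have hrec := ih (l.length - (start + k + 1)) (by omega)
          (l.set (start + k + 1) (PySem.Chars.upperChar c)) (start + k + 1)
          (by simp [List.length_set])
        rw [hrec, hset]
        have hts : (l.take start).length = start := by rw [List.length_take]; omega
        have htake : (l.take start ++ pre ++ '-' :: PySem.Chars.upperChar c :: rest).take (start + k + 1)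
            = l.take start ++ pre ++ ['-'] := by
          rw [List.append_assoc, List.take_append, List.take_take,
              min_eq_right (by omega), hts,
              show start + k + 1 - start = k + 1 by omega, List.take_append,
              List.take_of_length_le (l := pre) (by omega), hlen,
              show k + 1 - k = 1 by omega]
          simp
        have hdrop : (l.take start ++ pre ++ '-' :: PySem.Chars.upperChar c :: rest).drop (start + k + 1)
            = PySem.Chars.upperChar c :: rest := by
          rw [List.append_assoc, List.drop_append,
              List.drop_eq_nil_of_le (as := l.take start) (by rw [hts]; omega), hts,
              show start + k + 1 - start = k + 1 by omega, List.drop_append,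
              List.drop_eq_nil_of_le (as := pre) (by omega), hlen,
              show k + 1 - k = 1 by omega]
          simp
        rw [htake, hdrop, hsplit, pvBLoop_append _ _ hnot]
        have : pvBLoop ('-' :: c :: rest) false
            = '-' :: pvBLoop (PySem.Chars.upperChar c :: rest) false := by
          rw [show pvBLoop ('-' :: c :: rest) false = '-' :: pvBLoop (c :: rest) true by simp [pvBLoop]]
          rw [pvBLoop_true_cons]
        rw [this]
        simp

theorem capitalize_header_py_spec : Claim_equal_capitalize_header_py := by
  intro header _ hpre
  unfold Spec_capitalize_header_py capitalize_header_py capitalize_header_py_alt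
  cases hl : header.toList with
  | nil =>
    exact absurd (String.toList_eq_nil_iff.mp hl) hpre
  | cons c rest =>
    show String.mk (pvALoop (PySem.Chars.upperChar c :: rest) 0)
        = String.mk (pvBLoop (c :: rest) true)
    rw [pvALoop_eq ((PySem.Chars.upperChar c :: rest).length)
        (PySem.Chars.upperChar c :: rest) 0 (by simp)]
    simp only [List.take_zero, List.drop_zero, List.nil_append]
    rw [← pvBLoop_true_cons]
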